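-- pv_equiv track=rewrite | github.com/newfull5/CodeSignal | digitDegree.py | digitDegree
-- ===== SOURCE A (Python) =====
-- def digitDegree(n):
--     n = str(n)
--     cnt = 0
--     while True:
--         temp = 0
--         if int(n) < 10:
--             return cnt
--         n = str(n)
--         for i in range(0, len(n)):
--             temp += int(n[i])
--
--         n = temp
--         cnt += 1
-- ===== SOURCE B (Python) =====
-- def digitDegree(n):
--     if n < 10:
--         return 0
--     return 1 + digitDegree(_digit_sum(n))
--
--
-- def _digit_sum(m):
--     return m if m < 10 else _digit_sum(m // 10) + m % 10
-- ===== Notes on version B (the rewrite author's own statement) =====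
-- stated objective: alternative
-- what changed: B replaces A's while-loop with a string conversion and per-character int() summing each round by a direct recursion on the arithmetic digit-sum recurrence (// 10 and % 10), with no string conversion and no explicit counter.
import Mathlib
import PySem

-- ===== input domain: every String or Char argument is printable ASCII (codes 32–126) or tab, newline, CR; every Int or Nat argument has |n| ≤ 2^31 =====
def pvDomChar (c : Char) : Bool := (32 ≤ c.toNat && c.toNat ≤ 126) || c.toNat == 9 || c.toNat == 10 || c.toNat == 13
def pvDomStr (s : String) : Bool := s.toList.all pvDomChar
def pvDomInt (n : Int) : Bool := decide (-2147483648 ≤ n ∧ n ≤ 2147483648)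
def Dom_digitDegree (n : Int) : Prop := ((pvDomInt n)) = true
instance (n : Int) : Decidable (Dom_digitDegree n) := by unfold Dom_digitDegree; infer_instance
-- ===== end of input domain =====

-- B replaces A's str/int digit-summing loop by a direct recursion on the arithmetic
-- digit-sum recurrence (// 10 and % 10); alternative decomposition, same cost.


-- ===== PORT A =====
-- int(c) for a one-character string c, as A's `temp += int(n[i])` does.
def pvCharInt (c : Char) : Int := (PySem.Int.ofChars? [c]).getD 0

-- A's `while True` loop.  The loop state alternates between the string str(m) and the
-- integer m with int(str(m)) = m, so it is carried as the integer m and the character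
-- list str(m) is materialised exactly where A writes `n = str(n)`.  The fuel argument
-- only makes the recursion structural; the proofs show it is never exhausted.
def digitDegreeGo : Nat → Int → Int → Int
  | 0, _, cnt => cnt
  | fuel+1, m, cnt =>
      if m < 10 then cnt
      else
        let s := PySem.Int.toChars m
        let temp :=
          (PySem.List.pyRange 0 (s.length : Int) 1).foldl
            (fun t i => t + pvCharInt (PySem.List.pyGetD s i ' ')) 0
        digitDegreeGo fuel temp (cnt + 1)

def digitDegree (n : Int) : Int := digitDegreeGo (n.toNat + 1) n 0

-- ===== PORT B =====
-- B's helper _digit_sum.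
def pvDigitSum (m : Int) : Int :=
  if m < 10 then m
  else pvDigitSum (PySem.Int.floordiv m 10) + PySem.Int.mod m 10
termination_by m.toNat
decreasing_by
  simp only [PySem.Int.floordiv, Int.fdiv_eq_ediv]
  omega

-- termination facts for digitDegree_alt (cited by its decreasing_by)
theorem pvDigitSum_bounds : ∀ k : Nat, ∀ m : Int, m.toNat = k → 0 ≤ m →
    0 ≤ pvDigitSum m ∧ pvDigitSum m ≤ m := by
  intro k
  induction k using Nat.strong_induction_on with
  | _ k ih =>
    intro m hk hm
    rw [pvDigitSum]
    split_ifs with h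
    · exact ⟨hm, le_refl m⟩
    · have hdiv : PySem.Int.floordiv m 10 = m / 10 := by
        simp only [PySem.Int.floordiv, Int.fdiv_eq_ediv]; simp
      have hmod : PySem.Int.mod m 10 = m % 10 := by
        simp only [PySem.Int.mod]; rw [Int.fmod_eq_emod]; simp
      rw [hdiv, hmod]
      have hrec := ih (m / 10).toNat (by omega) (m / 10) rfl (by omega)
      omega

theorem pvDigitSum_lt (m : Int) (h : 10 ≤ m) : pvDigitSum m < m := by
  rw [pvDigitSum]
  split_ifs with h' 
  · omega
  · have hdiv : PySem.Int.floordiv m 10 = m / 10 := by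
      simp only [PySem.Int.floordiv, Int.fdiv_eq_ediv]; simp
    have hmod : PySem.Int.mod m 10 = m % 10 := by
      simp only [PySem.Int.mod]; rw [Int.fmod_eq_emod]; simp
    rw [hdiv, hmod]
    have hrec := pvDigitSum_bounds (m / 10).toNat (m / 10) rfl (by omega)
    omega

def digitDegree_alt (n : Int) : Int :=
  if n < 10 then 0 else 1 + digitDegree_alt (pvDigitSum n)
termination_by n.toNat
decreasing_by
  have h1 : pvDigitSum n < n := pvDigitSum_lt n (by omega)
  omega

-- ===== PRECONDITION & SPEC =====
def Spec_digitDegree (n : Int) (out : Int) : Prop := out = digitDegree_alt n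
instance (n : Int) (out : Int) : Decidable (Spec_digitDegree n out) := by unfold Spec_digitDegree; infer_instance

-- ===== CLAIM (what is proved, stated in full; the proofs are below) =====
def Claim_equal_digitDegree : Prop := ∀ (n : Int), Dom_digitDegree n → Spec_digitDegree n (digitDegree n)

-- ===== LEMMAS AND PROOFS =====

theorem pvDigitSum_nonneg (m : Int) (h : 0 ≤ m) : 0 ≤ pvDigitSum m :=
  (pvDigitSum_bounds m.toNat m rfl h).1

-- the character-value sum of a list of characters, as an Int
def pvCSum (cs : List Char) : Int := (cs.map pvCharInt).sum

theorem pvCharInt_digitChar (d : Nat) (hd : d < 10) :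
    pvCharInt (Nat.digitChar d) = (d : Int) := by
  interval_cases d <;> decide

theorem pvCSum_toDigitsCore (fuel : Nat) :
    ∀ (k : Nat) (acc : List Char), k < 10 ^ fuel →
      pvCSum (Nat.toDigitsCore 10 fuel k acc) = pvDigitSum (k : Int) + pvCSum acc := by
  induction fuel with
  | zero =>
    intro k acc hk
    have hk0 : k = 0 := by omega
    subst hk0
    simp [Nat.toDigitsCore, pvDigitSum]
  | succ f ih =>
    intro k acc hk
    rw [Nat.toDigitsCore]
    by_cases h0 : k / 10 = 0
    · have hk10 : k < 10 := by omega
      simp only [h0, if_true]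
      rw [pvDigitSum]
      have : (k : Int) < 10 := by omega
      rw [if_pos this]
      have hmod : k % 10 = k := by omega
      simp [pvCSum, hmod, pvCharInt_digitChar k hk10]
    · simp only [h0, if_false]
      have hdivlt : k / 10 < 10 ^ f := by
        rw [Nat.div_lt_iff_lt_mul (by norm_num)]
        calc k < 10 ^ (f + 1) := hk
          _ = 10 ^ f * 10 := by ring
      rw [ih (k / 10) _ hdivlt]
      have hk10 : ¬ ((k : Int) < 10) := by omega
      conv_rhs => rw [pvDigitSum]
      rw [if_neg hk10]
      have hdiv : PySem.Int.floordiv (k : Int) 10 = ((k / 10 : Nat) : Int) := by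
        simp only [PySem.Int.floordiv, Int.fdiv_eq_ediv]
        simp only [show ((0:Int) ≤ 10 ∨ (10:Int) ∣ (k:Int)) from Or.inl (by norm_num), if_pos, sub_zero]
        omega
      have hmod : PySem.Int.mod (k : Int) 10 = ((k % 10 : Nat) : Int) := by
        simp only [PySem.Int.mod]; rw [Int.fmod_eq_emod]
        simp only [show ((0:Int) ≤ 10 ∨ (10:Int) ∣ (k:Int)) from Or.inl (by norm_num), if_pos, add_zero]
        omega
      rw [hdiv, hmod]
      have hmodlt : k % 10 < 10 := by omega
      simp [pvCSum, pvCharInt_digitChar _ hmodlt]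
      ring

theorem pvCSum_toChars (m : Int) (hm : 0 ≤ m) :
    pvCSum (PySem.Int.toChars m) = pvDigitSum m := by
  rw [PySem.Int.toChars, if_neg (by omega : ¬ m < 0)]
  rw [Nat.toDigits]
  have hfuel : m.toNat < 10 ^ (m.toNat + 1) := by
    calc m.toNat < 10 ^ m.toNat := Nat.lt_pow_self (by norm_num)
      _ ≤ 10 ^ (m.toNat + 1) := Nat.pow_le_pow_right (by norm_num) (by omega)
  rw [pvCSum_toDigitsCore (m.toNat + 1) m.toNat [] hfuel]
  simp [pvCSum, Int.toNat_of_nonneg hm]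

theorem foldl_add_pvCharInt (cs : List Char) :
    ∀ t : Int, cs.foldl (fun t c => t + pvCharInt c) t = t + pvCSum cs := by
  induction cs with
  | nil => intro t; simp [pvCSum]
  | cons c cs ih => intro t; simp [pvCSum, List.foldl, ih (t + pvCharInt c)]; ring

theorem digitDegreeGo_eq (fuel : Nat) :
    ∀ (m cnt : Int), m.toNat < fuel →
      digitDegreeGo fuel m cnt = cnt + digitDegree_alt m := by
  induction fuel with
  | zero => intro m cnt h; omega
  | succ f ih =>
    intro m cnt hfuel
    rw [digitDegreeGo, digitDegree_alt]
    by_cases h : m < 10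
    · rw [if_pos h, if_pos h]; ring
    · rw [if_neg h, if_neg h]
      have hm : 0 ≤ m := by omega
      have htemp :
          (PySem.List.pyRange 0 ((PySem.Int.toChars m).length : Int) 1).foldl
            (fun t i => t + pvCharInt (PySem.List.pyGetD (PySem.Int.toChars m) i ' ')) 0
          = pvDigitSum m := by
        rw [PySem.List.foldl_pyRange_zero_pyGetD' (PySem.Int.toChars m) ' '
              (fun t c => t + pvCharInt c) 0]
        rw [foldl_add_pvCharInt, pvCSum_toChars m hm]
        ring
      simp only [htemp]
      have hlt : pvDigitSum m < m := pvDigitSum_lt m (by omega)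
      have hnn : 0 ≤ pvDigitSum m := pvDigitSum_nonneg m hm
      rw [ih (pvDigitSum m) (cnt + 1) (by omega)]
      ring

-- ===== VERDICT (by name: the statement is the Claim_ definition above) =====
theorem digitDegree_spec : Claim_equal_digitDegree := by
  intro n _
  unfold Spec_digitDegree digitDegree
  rw [digitDegreeGo_eq (n.toNat + 1) n 0 (by omega)]
  ring
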